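-- pv_equiv track=rewrite | github.com/SooDevv/Algorithm_Training | Codility/Lesson1/BinaryGap.py | solution
-- ===== SOURCE A (Python) =====
-- def solution(binary):
--     i = 0
--     max_cnt = 0
--     cnt = 0
--     flag = False
--
--     for i in range(len(binary)):
--         if binary[i] == '1':
--             if flag:
--                 if cnt > max_cnt:
--                     max_cnt = cnt
--                 cnt = 0
--             else:
--                 cnt = 0
--                 flag = True
--         else:
--             cnt += 1
--
--     return max_cnt
-- ===== SOURCE B (Python) =====
-- def solution(binary):
--     idx = [i for i, c in enumerate(binary) if c == '1']
--     return max((b - a - 1 for a, b in zip(idx, idx[1:])), default=0)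
-- ===== Notes on version B (the rewrite author's own statement) =====
-- stated objective: alternative
-- what changed: Replaces A's flag/counter state machine over character indices with an index table of the one-bit positions (enumerate+filter) followed by a pairwise-difference maximum over consecutive positions.
import Mathlib
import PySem

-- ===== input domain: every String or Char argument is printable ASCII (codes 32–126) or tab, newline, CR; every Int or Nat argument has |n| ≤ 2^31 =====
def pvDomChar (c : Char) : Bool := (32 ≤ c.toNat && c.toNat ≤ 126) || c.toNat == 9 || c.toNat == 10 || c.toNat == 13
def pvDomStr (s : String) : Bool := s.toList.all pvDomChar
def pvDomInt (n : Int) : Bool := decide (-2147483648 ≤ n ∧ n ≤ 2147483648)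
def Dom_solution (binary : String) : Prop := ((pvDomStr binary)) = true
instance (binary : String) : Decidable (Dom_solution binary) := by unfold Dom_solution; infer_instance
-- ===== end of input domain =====

-- B replaces A's flag/counter state machine with an index table of '1' positions plus a
-- pairwise-difference maximum (different decomposition, same O(n) cost).

-- ===== PORT A =====
-- A: scan indices with state (max_cnt, cnt, flag); reset the counter at each '1'.
def solution (binary : String) : Int :=
  let cs := binary.toList
  let st :=
    (PySem.List.pyRange 0 (PySem.List.len cs) 1).foldl
      (fun (st : Int × Int × Bool) i =>
        let max_cnt := st.1; let cnt := st.2.1; let flag := st.2.2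
        if PySem.List.pyGetD cs i ' ' = '1' then
          if flag then
            (if cnt > max_cnt then cnt else max_cnt, 0, true)
          else
            (max_cnt, 0, true)
        else
          (max_cnt, cnt + 1, flag))
      (0, 0, false)
  st.1

-- ===== PORT B =====
-- B: idx = [i for i, c in enumerate(binary) if c == '1']; max of pairwise gaps, default 0.
def solution_alt (binary : String) : Int :=
  let idx := ((PySem.List.enumerate binary.toList 0).filter (fun p => p.2 == '1')).map (fun p => p.1)
  PySem.List.maxD ((idx.zip idx.tail).map (fun p => p.2 - p.1 - 1)) (fun x => x) 0

-- ===== PRECONDITION & SPEC =====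
def Spec_solution (binary : String) (out : Int) : Prop := out = solution_alt binary
instance (binary : String) (out : Int) : Decidable (Spec_solution binary out) := by unfold Spec_solution; infer_instance

-- ===== CLAIM (what is proved, stated in full; the proofs are below) =====
def Claim_equal_solution : Prop := ∀ (binary : String), Dom_solution binary → Spec_solution binary (solution binary)

-- ===== LEMMAS AND PROOFS =====

-- completed gap lengths of l, with c non-'1' chars already pending since the last '1'
def pvGaps (c : Int) : List Char → List Int
  | [] => []
  | ch :: t => if ch = '1' then c :: pvGaps 0 t else pvGaps (c + 1) t

-- gap lengths after (and not counting anything before) the first '1'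
def pvGapsAfter : List Char → List Int
  | [] => []
  | ch :: t => if ch = '1' then pvGaps 0 t else pvGapsAfter t

def pvStep (st : Int × Int × Bool) (ch : Char) : Int × Int × Bool :=
  if ch = '1' then
    if st.2.2 then (if st.2.1 > st.1 then st.2.1 else st.1, 0, true)
    else (st.1, 0, true)
  else (st.1, st.2.1 + 1, st.2.2)

-- positions (starting at s) of the '1' characters of l
def pvOnes (s : Int) : List Char → List Int
  | [] => []
  | ch :: t => if ch = '1' then s :: pvOnes (s + 1) t else pvOnes (s + 1) t

def pvDiffs (idx : List Int) : List Int := (idx.zip idx.tail).map (fun p => p.2 - p.1 - 1)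

theorem pvFoldTrue (l : List Char) : ∀ (m c : Int),
    (l.foldl pvStep (m, c, true)).1 = (pvGaps c l).foldl max m := by
  induction l with
  | nil => intro m c; rfl
  | cons ch t ih =>
    intro m c
    by_cases h : ch = '1'
    · simp only [List.foldl_cons, pvGaps, h, if_pos]
      rw [show pvStep (m, c, true) '1' = (if c > m then c else m, 0, true) by simp [pvStep]]
      rw [ih]
      congr 1
      simp only [max_def]
      split <;> split <;> omega
    · simp [pvStep, pvGaps, h, ih]

theorem pvFoldFalse (l : List Char) : ∀ (m c : Int),
    (l.foldl pvStep (m, c, false)).1 = (pvGapsAfter l).foldl max m := by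
  induction l with
  | nil => intro m c; rfl
  | cons ch t ih =>
    intro m c
    by_cases h : ch = '1' <;> simp [pvStep, pvGapsAfter, h, ih, pvFoldTrue]

theorem pvOnes_eq (l : List Char) : ∀ s : Int,
    ((PySem.List.enumerate l s).filter (fun p => p.2 == '1')).map (fun p => p.1) = pvOnes s l := by
  induction l with
  | nil => intro s; rfl
  | cons ch t ih =>
    intro s
    by_cases h : ch = '1' <;>
      simp [PySem.List.enumerate_cons, h, ih, pvOnes]

theorem pvDiffs_cons (l : List Char) : ∀ (s a : Int),
    pvDiffs (a :: pvOnes s l) = pvGaps (s - a - 1) l := by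
  induction l with
  | nil => intro s a; rfl
  | cons ch t ih =>
    intro s a
    by_cases h : ch = '1'
    · have h2 := ih (s + 1) s
      simp only [pvOnes, h, if_pos, pvGaps, pvDiffs, List.tail] at h2 ⊢
      simp only [List.zip_cons_cons, List.map_cons] at h2 ⊢
      rw [h2]
      norm_num
    · simp only [pvOnes, h, pvGaps, if_neg, not_false_iff]
      rw [ih (s + 1) a]
      ring_nf

theorem pvDiffs_ones (l : List Char) : ∀ s : Int, pvDiffs (pvOnes s l) = pvGapsAfter l := by
  induction l with
  | nil => intro s; rfl
  | cons ch t ih =>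
    intro s
    by_cases h : ch = '1'
    · simp only [pvOnes, h, if_true, pvGapsAfter]
      rw [pvDiffs_cons t (s + 1) s]
      norm_num
    · simp [pvOnes, h, pvGapsAfter, ih]

theorem pvGaps_nonneg (l : List Char) : ∀ (c x : Int), 0 ≤ c → x ∈ pvGaps c l → 0 ≤ x := by
  induction l with
  | nil => simp [pvGaps]
  | cons ch t ih =>
    intro c x hc hx
    by_cases h : ch = '1'
    · simp [pvGaps, h] at hx
      rcases hx with rfl | hx
      · exact hc
      · exact ih 0 x le_rfl hx
    · simp [pvGaps, h] at hx
      exact ih (c + 1) x (by omega) hx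

theorem pvGapsAfter_nonneg (l : List Char) : ∀ x ∈ pvGapsAfter l, 0 ≤ x := by
  induction l with
  | nil => simp [pvGapsAfter]
  | cons ch t ih =>
    intro x hx
    by_cases h : ch = '1'
    · simp [pvGapsAfter, h] at hx
      exact pvGaps_nonneg t 0 x le_rfl hx
    · simp [pvGapsAfter, h] at hx
      exact ih x hx

theorem pvMaxD_eq (g : List Int) (hnn : ∀ x ∈ g, 0 ≤ x) :
    PySem.List.maxD g (fun x => x) 0 = g.foldl max 0 := by
  cases g with
  | nil => rfl
  | cons x t =>
    have hx : max 0 x = x := max_eq_right (hnn x (by simp))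
    simp [PySem.List.maxD, PySem.List.max?_id_cons, List.foldl_cons, hx]

-- ===== VERDICT (by name: the statement is the Claim_ definition above) =====
theorem solution_spec : Claim_equal_solution := by
  intro binary _
  unfold Spec_solution solution solution_alt
  show (List.foldl (fun acc j => pvStep acc (PySem.List.pyGetD binary.toList j ' ')) (0, 0, false)
          (PySem.List.pyRange 0 (PySem.List.len binary.toList))).1 =
       PySem.List.maxD (pvDiffs (((PySem.List.enumerate binary.toList 0).filter
          (fun p => p.2 == '1')).map (fun p => p.1))) (fun x => x) 0
  rw [PySem.List.foldl_pyRange_pyGetD binary.toList ' ' pvStep (0, 0, false) le_rfl]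
  simp only [Int.toNat_zero, List.drop_zero]
  rw [pvFoldFalse, pvOnes_eq]
  rw [pvDiffs_ones, pvMaxD_eq _ (pvGapsAfter_nonneg binary.toList)]
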